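-- pv_equiv track=rewrite | github.com/sidb95/code-problems | hackerrank/practice/bigger-is-greater.py | nextIndex
-- ===== SOURCE A (Python) =====
-- def nextIndex(w, i, n):
--     s = sorted(w)
--     c = w[i]
--     j = 0
--     while (j < n):
--         if (s[j] == c):
--             if (j == (n - 1)):
--                 c = s[j]
--             else:
--                 c = s[j + 1]
--             break
--         j += 1
--     for j in range(n - 1, -1, -1):
--         if (w[j] == c):
--             return j
--     return j
-- ===== SOURCE B (Python) =====
-- def nextIndex(w, i, n):
--     # O(n), no sort: one pass over w counting chars below/equal to c and the
--     # smallest char above c; that determines the char whose last index (within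
--     # the first n positions) is wanted, found by one backward scan.
--     c = w[i]
--     lt = 0
--     cnt = 0
--     nxt = None
--     for ch in w:
--         if ch < c:
--             lt += 1
--         elif ch == c:
--             cnt += 1
--         elif nxt is None or ch < nxt:
--             nxt = ch
--     target = nxt if (cnt == 1 and lt + 1 < n) else c
--     for j in range(n - 1, -1, -1):
--         if w[j] == target:
--             return j
--     return 0  # no position matches (then A's loop also falls through to 0)
-- ===== Notes on version B (the rewrite author's own statement) =====
-- stated objective: faster
-- what changed: A sorts the string and walks the sorted copy to find the character following the first occurrence of w[i]; B computes that character in one unsorted counting pass (#chars < c, #chars == c, minimum char > c), then does the same backward scan for its last index.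
import Mathlib
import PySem

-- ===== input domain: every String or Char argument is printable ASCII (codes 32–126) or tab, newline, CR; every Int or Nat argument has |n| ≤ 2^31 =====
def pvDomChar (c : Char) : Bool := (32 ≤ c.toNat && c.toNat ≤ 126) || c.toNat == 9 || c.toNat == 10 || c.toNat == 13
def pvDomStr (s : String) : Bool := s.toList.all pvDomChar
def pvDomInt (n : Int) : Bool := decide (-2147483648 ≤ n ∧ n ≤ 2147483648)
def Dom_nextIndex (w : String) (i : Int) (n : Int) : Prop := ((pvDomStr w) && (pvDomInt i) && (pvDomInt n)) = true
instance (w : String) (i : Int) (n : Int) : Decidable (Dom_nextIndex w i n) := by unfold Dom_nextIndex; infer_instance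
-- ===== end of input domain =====

-- B replaces A's sort-then-search with a single counting/min-tracking pass over w (no sort).

-- ===== PORT A =====
-- A's while loop: scan sorted s from index j for the first position < n holding c, then update c; returns (c, j)
def nextIndexWhile (s : List Char) (n : Int) (c : Char) (j : Int) : Nat → Char × Int
  | 0 => (c, j)
  | Nat.succ f =>
    if j < n then
      match PySem.List.pyGet? s j with
      | none => (c, j)            -- IndexError (s[j]): outside Pre_
      | some sj =>
        if sj = c then
          (if j = n - 1 then sj else (PySem.List.pyGet? s (j + 1)).getD c, j)
        else nextIndexWhile s n c (j + 1) f
    else (c, j)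

-- A's for loop over range(n-1,-1,-1): return the first matching index, else the last loop value (threaded as j)
def nextIndexScan (wl : List Char) (c : Char) (l : List Int) (j : Int) : Int :=
  match l with
  | [] => j
  | k :: rest => if PySem.List.pyGet? wl k = some c then k else nextIndexScan wl c rest k

def nextIndex (w : String) (i : Int) (n : Int) : Int :=
  let wl := w.toList
  let s := PySem.List.sorted wl id false
  match PySem.Str.pyGet? w i with
  | none => 0                     -- IndexError (w[i]): outside Pre_
  | some c =>
    let r := nextIndexWhile s n c 0 n.toNat
    nextIndexScan wl r.1 (PySem.List.pyRange (n - 1) (-1) (-1)) r.2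

-- ===== PORT B =====
-- the backward scan of B; target is an Option because Python's nxt may be None (never under Pre_)
def altScan (wl : List Char) (t : Option Char) : List Int → Int
  | [] => 0                       -- no position matched
  | k :: rest => if PySem.List.pyGet? wl k = t then k else altScan wl t rest

def nextIndex_alt (w : String) (i : Int) (n : Int) : Int :=
  match PySem.Str.pyGet? w i with
  | none => 0
  | some c =>
    let acc := w.toList.foldl (fun (p : Int × Int × Option Char) ch =>
        if ch < c then (p.1 + 1, p.2.1, p.2.2)
        else if ch = c then (p.1, p.2.1 + 1, p.2.2)
        else match p.2.2 with
          | none => (p.1, p.2.1, some ch)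
          | some m => if ch < m then (p.1, p.2.1, some ch) else p)
      ((0 : Int), (0 : Int), (none : Option Char))
    let target : Option Char := if acc.2.1 = 1 ∧ acc.1 + 1 < n then acc.2.2 else some c
    altScan w.toList target (PySem.List.pyRange (n - 1) (-1) (-1))

-- ===== PRECONDITION & SPEC =====
-- Pre_ is exactly the set of inputs on which A returns normally: i must be a valid (possibly
-- negative) index into w, and n ≤ len(w) (for n > len(w) A raises IndexError on s[j] or w[n-1]).
def Pre_nextIndex (w : String) (i : Int) (n : Int) : Prop :=
  -(w.toList.length : Int) ≤ i ∧ i < (w.toList.length : Int) ∧ n ≤ (w.toList.length : Int)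
instance (w : String) (i : Int) (n : Int) : Decidable (Pre_nextIndex w i n) := by
  unfold Pre_nextIndex; infer_instance

def pvWitness_nextIndex : String × Int × Int := ("ab", 0, 2)

def Spec_nextIndex (w : String) (i : Int) (n : Int) (out : Int) : Prop := out = nextIndex_alt w i n
instance (w : String) (i : Int) (n : Int) (out : Int) : Decidable (Spec_nextIndex w i n out) := by
  unfold Spec_nextIndex; infer_instance

-- ===== CLAIM (what is proved, stated in full; the proofs are below) =====
def Claim_equal_nextIndex : Prop := ∀ (w : String) (i : Int) (n : Int),
  Dom_nextIndex w i n → Pre_nextIndex w i n → Spec_nextIndex w i n (nextIndex w i n)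

-- ===== LEMMAS AND PROOFS =====

-- minimum over Option Char
def omin : Option Char → Option Char → Option Char
  | none, y => y
  | some x, none => some x
  | some x, some y => some (min x y)

-- smallest element of l strictly greater than c
def minGt (c : Char) : List Char → Option Char
  | [] => none
  | d :: t => if c < d then omin (some d) (minGt c t) else minGt c t

-- the abstract content of A's while loop: successor of the first occurrence of c (c if absent/last)
def findNext (c : Char) : List Char → Char
  | [] => c
  | a :: rest => if a = c then (match rest with | [] => a | b :: _ => b) else findNext c rest

theorem omin_none_right (x : Option Char) : omin x none = x := by cases x <;> rfl

theorem omin_assoc (x y z : Option Char) : omin (omin x y) z = omin x (omin y z) := by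
  cases x <;> cases y <;> cases z <;> simp [omin, min_assoc]

theorem omin_comm (x y : Option Char) : omin x y = omin y x := by
  cases x <;> cases y <;> simp [omin, min_comm]

theorem minGt_perm (c : Char) {l l' : List Char} (h : l.Perm l') : minGt c l = minGt c l' := by
  induction h with
  | nil => rfl
  | cons a _ ih => simp only [minGt, ih]
  | swap a b t =>
    simp only [minGt]
    split_ifs with h1 h2 h2 <;> try rfl
    rw [← omin_assoc, ← omin_assoc, omin_comm (some b) (some a)]
  | trans _ _ ih1 ih2 => exact ih1.trans ih2

theorem minGt_append (c : Char) (xs ys : List Char) :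
    minGt c (xs ++ ys) = omin (minGt c xs) (minGt c ys) := by
  induction xs with
  | nil => rfl
  | cons a t ih =>
    simp only [List.cons_append, minGt, ih]
    split_ifs with h
    · rw [omin_assoc]
    · rfl

theorem minGt_eq_none {c : Char} {l : List Char} (h : ∀ d ∈ l, ¬ c < d) : minGt c l = none := by
  induction l with
  | nil => rfl
  | cons a t ih =>
    simp only [minGt, if_neg (h a List.mem_cons_self)]
    exact ih (fun d hd => h d (List.mem_cons_of_mem _ hd))

-- on a sorted list whose elements are all > c, minGt is the head
theorem minGt_of_forall_gt {c : Char} {l : List Char} (hs : l.Pairwise (· ≤ ·))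
    (hgt : ∀ d ∈ l, c < d) : minGt c l = l.head? := by
  induction l with
  | nil => rfl
  | cons a t ih =>
    have ha : c < a := hgt a (List.mem_cons_self)
    have ht : ∀ d ∈ t, c < d := fun d hd => hgt d (List.mem_cons_of_mem _ hd)
    simp only [minGt, if_pos ha, ih (List.Pairwise.of_cons hs) ht]
    cases t with
    | nil => rfl
    | cons b t' =>
      have hab : a ≤ b := (List.pairwise_cons.mp hs).1 b List.mem_cons_self
      simp [omin, min_eq_left hab]

theorem findNext_append_not_mem {c : Char} {xs : List Char} (ys : List Char)
    (h : ∀ d ∈ xs, d ≠ c) : findNext c (xs ++ ys) = findNext c ys := by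
  induction xs with
  | nil => rfl
  | cons a t ih =>
    simp only [List.cons_append, findNext, if_neg (h a List.mem_cons_self)]
    exact ih (fun d hd => h d (List.mem_cons_of_mem _ hd))

-- a sorted list is: the elements below c, then the copies of c, then the elements above c
theorem sorted_decomp (c : Char) : ∀ {s : List Char}, s.Pairwise (· ≤ ·) →
    s = s.filter (fun d => decide (d < c)) ++
        (List.replicate (s.count c) c ++ s.filter (fun d => decide (c < d))) := by
  intro s hs
  induction s with
  | nil => rfl
  | cons a t ih =>
    have ht := List.Pairwise.of_cons hs
    have hrel : ∀ b ∈ t, a ≤ b := (List.pairwise_cons.mp hs).1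
    rcases lt_trichotomy a c with hlt | heq | hgt
    · have hne : a ≠ c := ne_of_lt hlt
      have h1 : (a :: t).count c = t.count c := by simp [List.count_cons, hne]
      have hfa : (a :: t).filter (fun d => decide (d < c))
          = a :: t.filter (fun d => decide (d < c)) := by
        simp [List.filter_cons, hlt]
      have hfb : (a :: t).filter (fun d => decide (c < d))
          = t.filter (fun d => decide (c < d)) := by
        simp [List.filter_cons, not_lt.mpr hlt.le]
      rw [h1, hfa, hfb, List.cons_append]
      exact congrArg (a :: ·) (ih ht)
    · subst heq
      have hf1 : t.filter (fun d => decide (d < a)) = [] := by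
        rw [List.filter_eq_nil_iff]
        intro d hd
        simp [not_lt.mpr (hrel d hd)]
      have hfa : (a :: t).filter (fun d => decide (d < a)) = [] := by
        simp [List.filter_cons, lt_irrefl, hf1]
      have hfb : (a :: t).filter (fun d => decide (a < d))
          = t.filter (fun d => decide (a < d)) := by
        simp [List.filter_cons, lt_irrefl]
      have h1 : (a :: t).count a = t.count a + 1 := by simp [List.count_cons]
      rw [hfa, hfb, h1, List.replicate_succ, List.nil_append, List.cons_append]
      have ht' := ih ht
      rw [hf1, List.nil_append] at ht'
      exact congrArg (a :: ·) ht'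
    · have hgtall : ∀ d ∈ t, c < d := fun d hd => lt_of_lt_of_le hgt (hrel d hd)
      have hcount : (a :: t).count c = 0 := by
        rw [List.count_eq_zero]
        intro hmem
        rcases List.mem_cons.mp hmem with rfl | hmem'
        · exact lt_irrefl c hgt
        · exact lt_irrefl c (hgtall c hmem')
      have hf1 : (a :: t).filter (fun d => decide (d < c)) = [] := by
        rw [List.filter_eq_nil_iff]
        intro d hd
        rcases List.mem_cons.mp hd with rfl | hd'
        · simp [not_lt.mpr hgt.le]
        · simp [not_lt.mpr (hgtall d hd').le]
      have hf2 : (a :: t).filter (fun d => decide (c < d)) = a :: t := by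
        rw [List.filter_eq_self]
        intro d hd
        rcases List.mem_cons.mp hd with rfl | hd'
        · simp [hgt]
        · simp [hgtall d hd']
      rw [hcount, hf1, hf2]
      simp

-- B's fold computes (#chars < c, #chars = c, min char > c)
theorem altFold3 (c : Char) (l : List Char) (a0 b0 : Int) (x0 : Option Char) :
    l.foldl (fun (p : Int × Int × Option Char) ch =>
        if ch < c then (p.1 + 1, p.2.1, p.2.2)
        else if ch = c then (p.1, p.2.1 + 1, p.2.2)
        else match p.2.2 with
          | none => (p.1, p.2.1, some ch)
          | some m => if ch < m then (p.1, p.2.1, some ch) else p) (a0, b0, x0)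
    = (a0 + (l.countP (fun d => decide (d < c)) : Int), b0 + (l.count c : Int),
       omin x0 (minGt c l)) := by
  induction l generalizing a0 b0 x0 with
  | nil => simp [omin_none_right, minGt]
  | cons d t ih =>
    simp only [List.foldl_cons]
    rcases lt_trichotomy d c with hlt | heq | hgt
    · have hne : d ≠ c := ne_of_lt hlt
      have hnc : ¬ c < d := not_lt.mpr hlt.le
      simp only [if_pos hlt, ih, List.countP_cons, List.count_cons, minGt, if_neg hnc,
        Prod.mk.injEq]
      refine ⟨?_, ?_, trivial⟩
      · simp [hlt]
        push_cast
        ring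
      · simp [hne]
    · subst heq
      simp only [if_neg (lt_irrefl d), if_pos rfl, ih, List.countP_cons, List.count_cons,
        minGt, if_neg (lt_irrefl d), Prod.mk.injEq]
      refine ⟨?_, ?_, by simp⟩
      · simp [lt_irrefl]
      · simp
        push_cast
        ring
    · have hne : d ≠ c := (ne_of_lt hgt).symm
      have hnl : ¬ d < c := not_lt.mpr hgt.le
      have hcnt : (d :: t).countP (fun x => decide (x < c)) = t.countP (fun x => decide (x < c)) := by
        simp [List.countP_cons, hnl]
      have hcnt2 : (d :: t).count c = t.count c := by simp [List.count_cons, hne]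
      simp only [if_neg hnl, if_neg hne, hcnt, hcnt2, minGt, if_pos hgt]
      cases x0 with
      | none => simp only [ih, omin]
      | some m =>
        by_cases hdm : d < m
        · simp only [if_pos hdm, ih]
          rw [← omin_assoc]
          simp [omin, min_eq_right hdm.le]
        · simp only [if_neg hdm, ih]
          rw [← omin_assoc]
          simp [omin, min_eq_left (not_lt.mp hdm)]

-- the character A ends up scanning for, computed from the three counts (the heart of the proof)
theorem charEq (c : Char) (s : List Char) (hs : s.Pairwise (· ≤ ·)) (hc : c ∈ s)
    (nn : Nat) (hnn : nn ≤ s.length) :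
    (if s.count c = 1 ∧ s.countP (fun d => decide (d < c)) + 1 < nn
     then minGt c s else some c) = some (findNext c (s.take nn)) := by
  set F := s.filter (fun d => decide (d < c)) with hF
  set C1 := s.filter (fun d => decide (c < d)) with hC1
  set cnt := s.count c with hcnt
  set lt := s.countP (fun d => decide (d < c)) with hlt
  have hdec : s = F ++ (List.replicate cnt c ++ C1) := sorted_decomp c hs
  have hFlen : F.length = lt := by
    rw [hF, hlt, List.countP_eq_length_filter]
  have hclen : s.length = lt + (cnt + C1.length) := by
    conv_lhs => rw [hdec]
    simp [hFlen]
  have hcnt1 : 0 < cnt := List.count_pos_iff.mpr hc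
  have hFmem : ∀ d ∈ F.take nn, d ≠ c := by
    intro d hd
    have hdF : d ∈ F := List.take_subset _ _ hd
    rw [hF] at hdF
    have := List.of_mem_filter hdF
    simp only [decide_eq_true_eq] at this
    exact ne_of_lt this
  have htake1 : s.take nn = F.take nn ++ (List.replicate cnt c ++ C1).take (nn - lt) := by
    conv_lhs => rw [hdec]
    rw [List.take_append, hFlen]
  have hfind1 : findNext c (s.take nn) = findNext c ((List.replicate cnt c ++ C1).take (nn - lt)) := by
    rw [htake1, findNext_append_not_mem _ hFmem]
  by_cases hk0 : nn - lt = 0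
  · rw [hfind1, hk0]
    simp only [List.take_zero, findNext]
    rw [if_neg (by rintro ⟨-, h⟩; omega)]
  · have hk1 : 1 ≤ nn - lt := Nat.pos_of_ne_zero hk0
    have htake2 : (List.replicate cnt c ++ C1).take (nn - lt)
        = List.replicate (min (nn - lt) cnt) c ++ C1.take (nn - lt - cnt) := by
      rw [List.take_append, List.take_replicate, List.length_replicate]
    have hm1 : 1 ≤ min (nn - lt) cnt := by omega
    have hrep : List.replicate (min (nn - lt) cnt) c
        = c :: List.replicate (min (nn - lt) cnt - 1) c := by
      conv_lhs => rw [show min (nn - lt) cnt = (min (nn - lt) cnt - 1) + 1 by omega]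
      rw [List.replicate_succ]
    by_cases hcond : cnt = 1 ∧ lt + 1 < nn
    · obtain ⟨hc1, hlt2⟩ := hcond
      -- the successor is the head of C1
      have hC1len : 1 ≤ C1.length := by omega
      obtain ⟨ch, C1', hCe⟩ : ∃ ch C1', C1 = ch :: C1' := by
        cases hx : C1 with
        | nil => rw [hx] at hC1len; simp at hC1len
        | cons ch C1' => exact ⟨ch, C1', rfl⟩
      have hmin1 : min (nn - lt) cnt = 1 := by omega
      have hktake : C1.take (nn - lt - cnt) = ch :: C1'.take (nn - lt - cnt - 1) := by
        rw [hCe, show nn - lt - cnt = (nn - lt - cnt - 1) + 1 by omega, List.take_succ_cons]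
        simp
      have hfind : findNext c (s.take nn) = ch := by
        rw [hfind1, htake2, hmin1, List.replicate_one, List.singleton_append, hktake]
        simp [findNext]
      have hmg : minGt c s = some ch := by
        conv_lhs => rw [hdec]
        rw [minGt_append, minGt_append]
        rw [minGt_eq_none (l := F) (by
          intro d hd
          rw [hF] at hd
          have := List.of_mem_filter hd
          simp only [decide_eq_true_eq] at this
          exact not_lt.mpr this.le)]
        rw [minGt_eq_none (l := List.replicate cnt c) (by
          intro d hd
          rw [List.eq_of_mem_replicate hd]
          exact lt_irrefl c)]
        have hpC : C1.Pairwise (· ≤ ·) := List.Pairwise.sublist List.filter_sublist hs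
        rw [minGt_of_forall_gt hpC (by
          intro d hd
          rw [hC1] at hd
          have := List.of_mem_filter hd
          simpa using this)]
        rw [hCe]
        rfl
      rw [if_pos ⟨hc1, hlt2⟩, hmg, hfind]
    · -- result is c in every remaining case
      have hfind : findNext c (s.take nn) = c := by
        rw [hfind1, htake2, hrep]
        by_cases hm2 : 2 ≤ min (nn - lt) cnt
        · rw [show min (nn - lt) cnt - 1 = (min (nn - lt) cnt - 2) + 1 by omega,
            List.replicate_succ]
          simp [findNext]
        · have hm : min (nn - lt) cnt = 1 := by omega
          have hz : nn - lt - cnt = 0 := by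
            rcases Nat.eq_or_lt_of_le hcnt1 with h1 | h2
            · have : ¬ lt + 1 < nn := fun hh => hcond ⟨h1.symm, hh⟩
              omega
            · omega
          rw [hm, hz]
          simp [findNext]
      rw [if_neg hcond, hfind]

-- A's while loop computes findNext on the n-prefix of the sorted list
theorem whileAux (s : List Char) (c : Char) (n : Int) (hlen : n ≤ (s.length : Int)) :
    ∀ (fuel : Nat) (j : Nat), fuel = n.toNat - j → j ≤ n.toNat →
      (nextIndexWhile s n c (j : Int) fuel).1 = findNext c ((s.take n.toNat).drop j) := by
  intro fuel
  induction fuel with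
  | zero =>
    intro j hf hj
    have hj' : j = n.toNat := by omega
    rw [nextIndexWhile, List.drop_eq_nil_of_le (by simp [hj'.ge]), findNext]
  | succ f ih =>
    intro j hf hj
    have hjn : j < n.toNat := by omega
    have hn0 : 0 < n := by omega
    have hcast : ((n.toNat : Nat) : Int) = n := Int.toNat_of_nonneg hn0.le
    have hjs : j < s.length := by omega
    have hjt : j < (s.take n.toNat).length := by simp; omega
    have hdrop : (s.take n.toNat).drop j = (s.take n.toNat)[j] :: (s.take n.toNat).drop (j + 1) :=
      (List.getElem_cons_drop hjt).symm
    have hgj : (s.take n.toNat)[j] = s[j] := List.getElem_take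
    rw [nextIndexWhile, if_pos (by omega), PySem.List.pyGet?_natCast,
      List.getElem?_eq_getElem hjs]
    simp only []
    by_cases heq : s[j] = c
    · rw [if_pos heq, hdrop]
      simp only [findNext]
      rw [hgj, if_pos heq]
      by_cases hlast : j = n.toNat - 1
      · have h1 : (j : Int) = n - 1 := by omega
        have h2 : (s.take n.toNat).drop (j + 1) = [] := List.drop_eq_nil_of_le (by simp; omega)
        rw [if_pos h1, h2]
      · have h1 : ¬ (j : Int) = n - 1 := by omega
        have hj1 : j + 1 < n.toNat := by omega
        have hj1s : j + 1 < s.length := by omega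
        have hj1t : j + 1 < (s.take n.toNat).length := by simp; omega
        have h2 : (s.take n.toNat).drop (j + 1)
            = (s.take n.toNat)[j + 1] :: (s.take n.toNat).drop (j + 2) :=
          (List.getElem_cons_drop hj1t).symm
        rw [if_neg h1, h2]
        have h3 : (j : Int) + 1 = ((j + 1 : Nat) : Int) := by push_cast; ring
        rw [h3, PySem.List.pyGet?_natCast, List.getElem?_eq_getElem hj1s]
        simp [List.getElem_take]
    · rw [if_neg heq]
      have h3 : (j : Int) + 1 = ((j + 1 : Nat) : Int) := by push_cast; ring
      rw [h3, ih (j + 1) (by omega) (by omega), hdrop]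
      simp only [findNext]
      rw [hgj, if_neg heq]

-- both backward scans return the first index in range(a,-1,-1) holding t, else 0
theorem scanAgree (wl : List Char) (t : Char) :
    ∀ (k : Nat) (a : Int), a.toNat = k → 0 ≤ a → ∀ j0 : Int,
      nextIndexScan wl t (PySem.List.pyRange a (-1) (-1)) j0
        = altScan wl (some t) (PySem.List.pyRange a (-1) (-1)) := by
  intro k
  induction k with
  | zero =>
    intro a hk ha j0
    have ha0 : a = 0 := by omega
    subst ha0
    rw [PySem.List.pyRange_neg_one_cons (by norm_num),
      PySem.List.pyRange_neg_one_eq_nil (by norm_num)]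
    simp only [nextIndexScan, altScan]
  | succ k ih =>
    intro a hk ha j0
    have ha1 : 1 ≤ a := by omega
    rw [PySem.List.pyRange_neg_one_cons (by omega)]
    simp only [nextIndexScan, altScan]
    split_ifs with h
    · rfl
    · exact ih (a - 1) (by omega) (by omega) a

-- ===== VERDICT (by name: the statement is the Claim_ definition above) =====
theorem nextIndex_spec : Claim_equal_nextIndex := by
  intro w i n _ hpre
  obtain ⟨hi1, hi2, hn⟩ := hpre
  have hbr : PySem.Str.pyGet? w i = PySem.List.pyGet? w.toList i := by
    simp [PySem.Str.pyGet?]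
  have hInR : PySem.Raise.InRange w.toList.length i := ⟨hi1, hi2⟩
  cases hg : PySem.Str.pyGet? w i with
  | none =>
    exfalso
    rw [hbr, PySem.List.pyGet?_eq_none_iff] at hg
    exact hg hInR
  | some c =>
    have hgl : PySem.List.pyGet? w.toList i = some c := by rw [← hbr]; exact hg
    have hcw : c ∈ w.toList := PySem.List.mem_of_pyGet?_eq_some _ hgl
    unfold Spec_nextIndex nextIndex nextIndex_alt
    simp only [hg, altFold3 c w.toList 0 0 none]
    set wl := w.toList with hwl
    set s := PySem.List.sorted wl id false with hsdef
    have hslen : s.length = wl.length := PySem.List.length_sorted wl id false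
    have hperm : s.Perm wl := PySem.List.sorted_perm wl id false
    have hpair : s.Pairwise (· ≤ ·) := by
      simpa using PySem.List.sorted_pairwise (xs := wl) (key := id)
    have hcs : c ∈ s := hperm.mem_iff.mpr hcw
    by_cases hn0 : n ≤ 0
    · have ht0 : n.toNat = 0 := Int.toNat_of_nonpos hn0
      have hrng : PySem.List.pyRange (n - 1) (-1) (-1) = [] :=
        PySem.List.pyRange_neg_one_eq_nil (by omega)
      rw [ht0, hrng]
      simp [nextIndexScan, altScan, nextIndexWhile]
    · have hpos : 0 < n := by omega
      have hnn_le : n.toNat ≤ s.length := by omega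
      have hA : (nextIndexWhile s n c 0 n.toNat).1 = findNext c (s.take n.toNat) := by
        have := whileAux s c n (by omega) n.toNat 0 (by omega) (by omega)
        simpa using this
      have hCE := charEq c s hpair hcs n.toNat hnn_le
      rw [hperm.count_eq, hperm.countP_eq, minGt_perm c hperm] at hCE
      have htgt : (if (0 : Int) + (wl.count c : Int) = 1 ∧
              (0 : Int) + (wl.countP (fun d => decide (d < c)) : Int) + 1 < n
            then omin none (minGt c wl) else some c)
          = some ((nextIndexWhile s n c 0 n.toNat).1) := by
        rw [hA, ← hCE]
        by_cases h1 : wl.count c = 1 ∧ wl.countP (fun d => decide (d < c)) + 1 < n.toNat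
        · rw [if_pos h1, if_pos (by constructor <;> omega)]
          cases minGt c wl <;> rfl
        · rw [if_neg h1, if_neg (by intro hh; exact h1 ⟨by omega, by omega⟩)]
      rw [htgt]
      exact scanAgree wl _ (n - 1).toNat (n - 1) rfl (by omega) _
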